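-- pv_equiv track=rewrite | github.com/joshp1/myDraft | wpdraft.py | _line_col_from_pos
-- ===== SOURCE A (Python) =====
-- def _clamp(v: int, lo: int, hi: int) -> int:
--     return lo if v < lo else hi if v > hi else v
--
-- def _line_col_from_pos(lines, starts, pos: int):
--     # Find last line whose start <= pos (linear is ok for v1)
--     i = 0
--     for j in range(len(starts)):
--         if starts[j] <= pos:
--             i = j
--         else:
--             break
--     col = pos - starts[i]
--     col = _clamp(col, 0, len(lines[i]))
--     return i, col
-- ===== SOURCE B (Python) =====
-- def _line_col_from_pos(lines, starts, pos: int):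
--     # Binary search (bisect_right by hand): find k = number of entries <= pos,
--     # valid because starts is a non-decreasing list of line-start offsets.
--     lo, hi = 0, len(starts)
--     while lo < hi:
--         mid = (lo + hi) // 2
--         if starts[mid] <= pos:
--             lo = mid + 1
--         else:
--             hi = mid
--     i = lo - 1 if lo > 0 else 0
--     col = pos - starts[i]
--     if col < 0:
--         col = 0
--     n = len(lines[i])
--     if col > n:
--         col = n
--     return i, col
-- ===== Notes on version B (the rewrite author's own statement) =====
-- stated objective: alternative
-- what changed: Replaces A's linear scan over starts by a hand-written bisect_right binary search; Pre_ additionally requires starts to be non-decreasing (the natural shape of line-start offsets), which is what makes the binary search exact; on unsorted starts (outside Pre_) the two may differ.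
-- outside the precondition, e.g. on _line_col_from_pos(['ab', 'cd'], [3, 0], 1): A returns (0, 0), B returns (1, 1)
import Mathlib
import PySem

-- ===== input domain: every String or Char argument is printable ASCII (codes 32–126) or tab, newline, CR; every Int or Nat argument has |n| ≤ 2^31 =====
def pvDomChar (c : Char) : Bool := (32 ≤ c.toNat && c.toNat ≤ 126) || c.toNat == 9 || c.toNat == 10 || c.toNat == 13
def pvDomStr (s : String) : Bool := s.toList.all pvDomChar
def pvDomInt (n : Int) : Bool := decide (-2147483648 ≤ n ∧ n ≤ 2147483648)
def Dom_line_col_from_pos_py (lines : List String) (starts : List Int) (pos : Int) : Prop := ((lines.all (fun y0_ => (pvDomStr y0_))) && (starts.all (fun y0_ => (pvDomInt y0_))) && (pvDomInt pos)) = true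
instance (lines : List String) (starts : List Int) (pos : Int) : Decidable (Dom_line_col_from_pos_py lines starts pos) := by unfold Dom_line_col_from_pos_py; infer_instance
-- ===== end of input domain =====

-- B replaces A's linear scan by a hand-written bisect_right binary search on starts,
-- exact because Pre_ requires starts non-decreasing (the shape of line-start offsets).


-- ===== PORT A =====
-- A's helper _clamp, branch for branch
def pvClamp (v lo hi : Int) : Int := if v < lo then lo else if hi < v then hi else v

-- A's for-loop over j with accumulator i and break on the first start > pos
def pvAFind (pos : Int) : List Int → Int → Int → Int
  | [], _, i => i
  | s :: rest, j, i => if s ≤ pos then pvAFind pos rest (j + 1) j else i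

def line_col_from_pos_py (lines : List String) (starts : List Int) (pos : Int) : Int × Int :=
  let i := pvAFind pos starts 0 0
  match PySem.List.pyGet? starts i, PySem.List.pyGet? lines i with
  | some s, some line => (i, pvClamp (pos - s) 0 (PySem.Str.len line))
  | _, _ => (0, 0)   -- IndexError in Python; excluded by Pre_

-- ===== PORT B =====
-- B's while loop: hand-written bisect_right on starts.
-- Indices lo ≤ mid < hi stay within the list, so starts.getD mid 0 is exactly Python's starts[mid].
def pvBisect (starts : List Int) (pos : Int) (lo hi : Nat) : Nat :=
  if _h : lo < hi then
    let mid := (lo + hi) / 2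
    if starts.getD mid 0 ≤ pos then pvBisect starts pos (mid + 1) hi
    else pvBisect starts pos lo mid
  else lo
termination_by hi - lo
decreasing_by all_goals omega

def line_col_from_pos_py_alt (lines : List String) (starts : List Int) (pos : Int) : Int × Int :=
  let k := pvBisect starts pos 0 starts.length
  let i : Int := if 0 < k then (k : Int) - 1 else 0
  match PySem.List.pyGet? starts i with
  | none => (0, 0)   -- IndexError in Python; excluded by Pre_
  | some s =>
    match PySem.List.pyGet? lines i with
    | none => (0, 0)   -- IndexError in Python; excluded by Pre_
    | some line =>
      let col := pos - s
      let col := if col < 0 then 0 else col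
      let n := PySem.Str.len line
      (i, if n < col then n else col)

-- ===== PRECONDITION & SPEC =====
-- Pre_ requires (a) starts nonempty and the selected line index inside lines — exactly where
-- Python A returns instead of raising IndexError — and (b) starts non-decreasing: this EXCLUDES
-- some inputs A returns on (unsorted starts), stated because the binary search of B is exact
-- only on sorted line-start offsets, the shape this helper is built for (see claim cites).
def Pre_line_col_from_pos_py (lines : List String) (starts : List Int) (pos : Int) : Prop :=
  starts ≠ [] ∧ List.Pairwise (· ≤ ·) starts ∧
    (let k : Int := (starts.takeWhile (fun s => decide (s ≤ pos))).length
     (if 0 < k then k - 1 else 0) < (lines.length : Int))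
instance (lines : List String) (starts : List Int) (pos : Int) : Decidable (Pre_line_col_from_pos_py lines starts pos) := by unfold Pre_line_col_from_pos_py; infer_instance

def pvWitness_line_col_from_pos_py : List String × List Int × Int := (["ab", "cd"], [0, 3], 4)

def Spec_line_col_from_pos_py (lines : List String) (starts : List Int) (pos : Int) (out : Int × Int) : Prop := out = line_col_from_pos_py_alt lines starts pos
instance (lines : List String) (starts : List Int) (pos : Int) (out : Int × Int) : Decidable (Spec_line_col_from_pos_py lines starts pos out) := by unfold Spec_line_col_from_pos_py; infer_instance

-- ===== CLAIM (what is proved, stated in full; the proofs are below) =====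
def Claim_equal_line_col_from_pos_py : Prop := ∀ (lines : List String) (starts : List Int) (pos : Int), Dom_line_col_from_pos_py lines starts pos → Pre_line_col_from_pos_py lines starts pos → Spec_line_col_from_pos_py lines starts pos (line_col_from_pos_py lines starts pos)

-- ===== LEMMAS AND PROOFS =====

-- number of leading entries ≤ pos (the quantity A's loop tracks)
def pvCountLe (pos : Int) : List Int → Nat
  | [] => 0
  | s :: rest => if s ≤ pos then 1 + pvCountLe pos rest else 0

theorem pvCountLe_le_length (pos : Int) (l : List Int) : pvCountLe pos l ≤ l.length := by
  induction l with
  | nil => simp [pvCountLe]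
  | cons s rest ih => simp only [pvCountLe, List.length_cons]; split <;> omega

theorem pvCountLe_eq_takeWhile (pos : Int) (l : List Int) :
    pvCountLe pos l = (l.takeWhile (fun s => decide (s ≤ pos))).length := by
  induction l with
  | nil => simp [pvCountLe]
  | cons s rest ih =>
    simp only [pvCountLe, List.takeWhile_cons]
    by_cases h : s ≤ pos
    · simp [h, ih]; omega
    · simp [h]

theorem pvAFind_eq (pos : Int) (l : List Int) :
    ∀ j i : Int, pvAFind pos l j i =
      if pvCountLe pos l = 0 then i else j + (pvCountLe pos l : Int) - 1 := by
  induction l with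
  | nil => intro j i; simp [pvAFind, pvCountLe]
  | cons s rest ih =>
    intro j i
    simp only [pvAFind, pvCountLe]
    by_cases h : s ≤ pos
    · simp only [h, if_pos, ih (j + 1) j]
      split_ifs <;> simp_all <;> push_cast <;> omega
    · simp [h]

-- bisect invariant: after the loop, everything before the result is ≤ pos and
-- everything from the result on is > pos (uses sortedness of starts)
theorem pvBisect_spec (starts : List Int) (pos : Int)
    (hsorted : ∀ a b : Nat, a ≤ b → b < starts.length → starts.getD a 0 ≤ starts.getD b 0) :
    ∀ lo hi : Nat, hi ≤ starts.length → lo ≤ hi →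
    (∀ j, j < lo → starts.getD j 0 ≤ pos) →
    (∀ j, hi ≤ j → j < starts.length → pos < starts.getD j 0) →
    ((∀ j, j < pvBisect starts pos lo hi → starts.getD j 0 ≤ pos) ∧
     (∀ j, pvBisect starts pos lo hi ≤ j → j < starts.length → pos < starts.getD j 0) ∧
     pvBisect starts pos lo hi ≤ starts.length) := by
  intro lo hi
  induction hlo : hi - lo using Nat.strong_induction_on generalizing lo hi with
  | _ d ih =>
    intro hhi hlohi hbefore hafter
    rw [pvBisect]
    by_cases h : lo < hi
    · simp only [h, dif_pos]
      set mid := (lo + hi) / 2 with hmid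
      have hm1 : lo ≤ mid := by omega
      have hm2 : mid < hi := by omega
      by_cases hle : starts.getD mid 0 ≤ pos
      · simp only [hle, if_pos]
        refine ih (hi - (mid + 1)) (by omega) (mid + 1) hi rfl hhi (by omega) ?_ hafter
        intro j hj
        by_cases hjlo : j < lo
        · exact hbefore j hjlo
        · exact le_trans (hsorted j mid (by omega) (by omega)) hle
      · simp only [hle, if_neg]
        refine ih (mid - lo) (by omega) lo mid rfl (by omega) (by omega) hbefore ?_
        intro j hj hjlen
        exact lt_of_not_ge fun hge => hle (le_trans (hsorted mid j hj hjlen) hge)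
    · simp only [h, dif_neg, not_false_iff]
      exact ⟨hbefore, by have := hafter; intro j hj hjl; exact hafter j (by omega) hjl, by omega⟩

-- the characterization pins the bisect result to pvCountLe
theorem pvCountLe_of_charac (pos : Int) (l : List Int) :
    ∀ r : Nat, r ≤ l.length →
    (∀ j, j < r → l.getD j 0 ≤ pos) →
    (∀ j, r ≤ j → j < l.length → pos < l.getD j 0) →
    pvCountLe pos l = r := by
  induction l with
  | nil => intro r hr _ _; simp at hr; simp [pvCountLe, hr]
  | cons s rest ih =>
    intro r hr h1 h2
    simp only [pvCountLe]
    by_cases hs : s ≤ pos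
    · simp only [hs, if_pos]
      have hr0 : 0 < r := by
        by_contra h0
        exact absurd (h2 0 (by omega) (by simp)) (by simpa using hs)
      have hrl : r - 1 ≤ rest.length := by simp at hr; omega
      have hrec := ih (r - 1) hrl
        (fun j hj => by simpa using h1 (j + 1) (by omega))
        (fun j hj hjl => by
          have := h2 (j + 1) (by omega) (by simp; omega)
          simpa using this)
      omega
    · have hr0 : r = 0 := by
        by_contra h0
        exact hs (by simpa using h1 0 (by omega))
      simp [hs, hr0]

theorem sorted_getD (starts : List Int) (hs : List.Pairwise (· ≤ ·) starts) :
    ∀ a b : Nat, a ≤ b → b < starts.length → starts.getD a 0 ≤ starts.getD b 0 := by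
  intro a b hab hb
  have ha : a < starts.length := lt_of_le_of_lt hab hb
  rw [List.getD_eq_getElem starts 0 ha, List.getD_eq_getElem starts 0 hb]
  rcases eq_or_lt_of_le hab with h | h
  · subst h; rfl
  · exact List.Pairwise.rel_get_of_lt hs (by simpa using h)

theorem pvBisect_eq_countLe (starts : List Int) (pos : Int)
    (hs : List.Pairwise (· ≤ ·) starts) :
    pvBisect starts pos 0 starts.length = pvCountLe pos starts := by
  obtain ⟨h1, h2, h3⟩ := pvBisect_spec starts pos (sorted_getD starts hs) 0 starts.length
    le_rfl (Nat.zero_le _) (fun j hj => absurd hj (by omega)) (fun j hj hjl => absurd hjl (by omega))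
  exact (pvCountLe_of_charac pos starts _ h3 h1 h2).symm

theorem pvStrLen_nonneg (s : String) : 0 ≤ PySem.Str.len s := by
  rw [PySem.Str.len_eq]; positivity

theorem pvClamp_eq (v hi : Int) (h : 0 ≤ hi) :
    pvClamp v 0 hi = (if hi < (if v < 0 then 0 else v) then hi else (if v < 0 then 0 else v)) := by
  simp only [pvClamp]
  split_ifs <;> omega

theorem line_col_from_pos_py_spec : Claim_equal_line_col_from_pos_py := by
  intro lines starts pos _ hpre
  obtain ⟨hne, hsort, hlt⟩ := hpre
  have hk := pvCountLe_eq_takeWhile pos starts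
  have hle := pvCountLe_le_length pos starts
  have hb := pvBisect_eq_countLe starts pos hsort
  have hi : pvAFind pos starts 0 0 =
      (if 0 < pvCountLe pos starts then (pvCountLe pos starts : Int) - 1 else 0) := by
    rw [pvAFind_eq]; split_ifs <;> omega
  set i : Int := (if 0 < pvCountLe pos starts then (pvCountLe pos starts : Int) - 1 else 0) with hidef
  have h0 : (0 : Int) ≤ i := by rw [hidef]; split_ifs <;> omega
  have hlen0 : 0 < starts.length := List.length_pos_iff.mpr hne
  have hlts : i < (starts.length : Int) := by rw [hidef]; split_ifs <;> push_cast <;> omega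
  have hltl : i < (lines.length : Int) := by
    have hlt' : (if 0 < ((starts.takeWhile (fun s => decide (s ≤ pos))).length : Int)
        then ((starts.takeWhile (fun s => decide (s ≤ pos))).length : Int) - 1 else 0)
        < (lines.length : Int) := hlt
    rw [hidef]
    split_ifs at hlt' ⊢ <;> omega
  show line_col_from_pos_py lines starts pos = line_col_from_pos_py_alt lines starts pos
  unfold line_col_from_pos_py line_col_from_pos_py_alt
  simp only [hi, hb, ← hidef]
  rw [PySem.List.pyGet?_eq_some_getElem _ h0 hlts, PySem.List.pyGet?_eq_some_getElem _ h0 hltl]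
  simp only
  rw [pvClamp_eq _ _ (pvStrLen_nonneg _)]

-- ===== VERDICT (by name: the statement is the Claim_ definition above) =====
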